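-- pv_equiv track=rewrite | github.com/jeremysmission/HybridRAG_V2 | tests/golden_eval/v1_reference/tuning_scripts/generation_autotune_live.py | select_eval_subset
-- ===== SOURCE A (Python) =====
-- def select_eval_subset(evals: list, n: int) -> list:
--     """Pick n answerable questions spread across roles."""
--     answerable = [q for q in evals if q.get("type") == "answerable"]
--     # Spread across roles for diversity
--     by_role = {}
--     for q in answerable:
--         role = q.get("role", "unknown")
--         by_role.setdefault(role, []).append(q)
--     selected = []
--     role_cycle = list(by_role.keys())
--     idx = 0
--     while len(selected) < n and any(by_role.values()):
--         role = role_cycle[idx % len(role_cycle)]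
--         if by_role[role]:
--             selected.append(by_role[role].pop(0))
--         idx += 1
--     return selected[:n]
-- ===== SOURCE B (Python) =====
-- from itertools import zip_longest
--
--
-- def select_eval_subset(evals: list, n: int) -> list:
--     """Pick n answerable questions spread across roles."""
--     if n <= 0:
--         return []
--     by_role = {}
--     for q in evals:
--         if q.get("type") == "answerable":
--             by_role.setdefault(q.get("role", "unknown"), []).append(q)
--     result = []
--     for col in zip_longest(*by_role.values()):
--         result.extend(q for q in col if q is not None)
--     return result[:n]
-- ===== Notes on version B (the rewrite author's own statement) =====
-- stated objective: idiomatic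
-- what changed: Replaces A's index-modulo while loop that repeatedly cycles the role list and pops the front of each group with a single column-major pass over the groups via itertools.zip_longest (guarding n <= 0), building the same round-robin order without mutating the lists.
import Mathlib
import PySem

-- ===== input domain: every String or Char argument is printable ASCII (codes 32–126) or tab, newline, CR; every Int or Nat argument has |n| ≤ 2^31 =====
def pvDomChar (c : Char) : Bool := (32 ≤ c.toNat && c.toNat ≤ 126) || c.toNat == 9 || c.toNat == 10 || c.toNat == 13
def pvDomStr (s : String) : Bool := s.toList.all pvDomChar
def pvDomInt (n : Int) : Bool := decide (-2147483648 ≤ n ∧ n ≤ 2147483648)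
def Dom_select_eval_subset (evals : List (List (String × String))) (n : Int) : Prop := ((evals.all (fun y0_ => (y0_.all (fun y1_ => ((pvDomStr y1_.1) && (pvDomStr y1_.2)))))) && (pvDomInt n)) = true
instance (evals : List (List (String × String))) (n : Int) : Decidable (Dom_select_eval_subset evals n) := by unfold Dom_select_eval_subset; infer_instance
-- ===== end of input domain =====

-- B replaces A's index-modulo while loop with destructive pop(0) by a column-major
-- traversal of the role groups (zip_longest); same return values; objective: simpler/idiomatic.

-- ===== PORT A =====
-- A's while loop, transliterated step for step; the extra fuel argument only bounds the
-- number of iterations (the loop always terminates; the caller passes a provably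
-- sufficient bound, so the fuel-exhausted branch is never reached).
def pvLoopA (fuel : Nat) (byRole : PySem.Dict String (List (List (String × String))))
    (cycle : List String) (selected : List (List (String × String))) (idx : Nat) (n : Int) :
    List (List (String × String)) :=
  match fuel with
  | 0 => selected
  | fuel + 1 =>
    if (selected.length : Int) < n ∧ byRole.values.any (fun l => !l.isEmpty) then
      match byRole.getD (cycle.getD (idx % cycle.length) "") [] with
      | [] => pvLoopA fuel byRole cycle selected (idx + 1) n
      | q :: rest =>
          pvLoopA fuel (byRole.insert (cycle.getD (idx % cycle.length) "") rest) cycle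
            (selected ++ [q]) (idx + 1) n
    else selected

def select_eval_subset (evals : List (List (String × String))) (n : Int) : List (List (String × String)) :=
  let answerable := evals.filter (fun q => (PySem.Dict.mk q).get? "type" == some "answerable")
  let byRole := answerable.foldl
    (fun d q => d.modify ((PySem.Dict.mk q).getD "role" "unknown") [] (fun l => l ++ [q]))
    PySem.Dict.empty
  let cycle := byRole.keys
  let selected := pvLoopA
    ((byRole.values.map List.length).sum * (cycle.length + 1) + cycle.length + 1)
    byRole cycle [] 0 n
  PySem.List.slice selected none (some n)

-- ===== PORT B =====
-- termination-measure facts for pvColumns (cited by its decreasing_by)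
theorem pvSumTail_le {α : Type} (gs : List (List α)) :
    ((gs.map List.tail).map List.length).sum ≤ (gs.map List.length).sum := by
  rw [List.map_map]
  apply List.sum_le_sum
  intro l _
  cases l <;> simp

theorem pvSumTail_lt {α : Type} (gs : List (List α)) (h : ¬ gs.all List.isEmpty) :
    ((gs.map List.tail).map List.length).sum < (gs.map List.length).sum := by
  induction gs with
  | nil => simp at h
  | cons g t ih =>
    simp only [List.all_cons, Bool.and_eq_true, not_and_or] at h
    simp only [List.map_cons, List.sum_cons]
    rcases h with h | h
    · have hg : g.tail.length < g.length := by
        cases g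
        · simp at h
        · simp
      have ht := pvSumTail_le t
      omega
    · have ht := ih h
      have hg : g.tail.length ≤ g.length := by cases g <;> simp
      omega

-- port of Source B's zip_longest loop: one column = the heads of the still-nonempty groups
-- (None padding filtered out), then recurse on the tails; exact for lists

-- port of Source B's zip_longest loop: one column = the heads of the still-nonempty groups
-- (the None padding is filtered out), then recurse on the tails; exact for lists
def pvColumns {α : Type} (gs : List (List α)) : List α :=
  if h : gs.all List.isEmpty then [] else
    gs.filterMap List.head? ++ pvColumns (gs.map List.tail)
termination_by (gs.map List.length).sum
decreasing_by
  exact pvSumTail_lt gs (by simpa using h)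

def select_eval_subset_alt (evals : List (List (String × String))) (n : Int) : List (List (String × String)) :=
  if n ≤ 0 then [] else
    let byRole := evals.foldl
      (fun d q => if (PySem.Dict.mk q).get? "type" == some "answerable" then
          d.modify ((PySem.Dict.mk q).getD "role" "unknown") [] (fun l => l ++ [q])
        else d)
      PySem.Dict.empty
    PySem.List.slice (pvColumns byRole.values) none (some n)

-- ===== PRECONDITION & SPEC =====

-- ===== PRECONDITION & SPEC =====
def Spec_select_eval_subset (evals : List (List (String × String))) (n : Int) (out : List (List (String × String))) : Prop := out = select_eval_subset_alt evals n
instance (evals : List (List (String × String))) (n : Int) (out : List (List (String × String))) : Decidable (Spec_select_eval_subset evals n out) := by unfold Spec_select_eval_subset; infer_instance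

-- ===== CLAIM (what is proved, stated in full; the proofs are below) =====
def Claim_equal_select_eval_subset : Prop := ∀ (evals : List (List (String × String))) (n : Int), Dom_select_eval_subset evals n → Spec_select_eval_subset evals n (select_eval_subset evals n)

-- ===== LEMMAS AND PROOFS =====

-- sum of lengths of the pending group lists
def pvSum {α : Type} (gs : List (List α)) : Nat := (gs.map List.length).sum

-- cycle steps (starting at position idx) until the next nonempty group
def pvDist {α : Type} (gs : List (List α)) (idx : Nat) : Nat :=
  (gs.rotate idx).findIdx (fun l => !l.isEmpty)

-- what remains to be emitted when A's loop stands at cycle position r: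
-- the tail of the current column, then all later columns
def pvTailCols {α : Type} (gs : List (List α)) (r : Nat) : List α :=
  (gs.drop r).filterMap List.head? ++ pvColumns (gs.take r ++ (gs.drop r).map List.tail)

theorem pvColumns_eq_nil {α : Type} (gs : List (List α)) (h : ∀ l ∈ gs, l = []) :
    pvColumns gs = [] := by
  rw [pvColumns, dif_pos]
  simp only [List.all_eq_true]
  intro l hl
  simp [h l hl]

theorem pvTC_zero {α : Type} (gs : List (List α)) : pvTailCols gs 0 = pvColumns gs := by
  by_cases h : gs.all List.isEmpty = true
  · have h' : ∀ l ∈ gs, l = [] := by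
      simp only [List.all_eq_true] at h
      intro l hl; simpa using h l hl
    rw [pvColumns_eq_nil gs h', pvTailCols]
    simp only [List.take_zero, List.drop_zero, List.nil_append]
    rw [List.filterMap_eq_nil_iff.mpr, pvColumns_eq_nil, List.nil_append]
    · intro l hl
      simp only [List.mem_map] at hl
      obtain ⟨g, hg, rfl⟩ := hl
      simp [h' g hg]
    · intro l hl
      simp [h' l hl]
  · rw [pvTailCols]
    conv_rhs => rw [pvColumns, dif_neg h]
    simp only [List.take_zero, List.drop_zero, List.nil_append]

theorem pvTC_skip {α : Type} (gs : List (List α)) (r : Nat) (hr : r < gs.length)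
    (hv : gs[r] = []) (hne : gs.any (fun l => !l.isEmpty) = true) :
    pvTailCols gs ((r + 1) % gs.length) = pvTailCols gs r := by
  rcases Nat.lt_or_ge (r + 1) gs.length with hlt | hge
  · rw [Nat.mod_eq_of_lt hlt]
    unfold pvTailCols
    rw [List.drop_eq_getElem_cons hr, hv, List.take_succ, List.getElem?_eq_getElem hr, hv]
    simp [List.filterMap_cons]
  · have hEq : r + 1 = gs.length := by omega
    rw [hEq, Nat.mod_self, pvTC_zero]
    unfold pvTailCols
    have hdrop : gs.drop r = [[]] := by
      rw [List.drop_eq_getElem_cons hr, hv, hEq, List.drop_length]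
    have htake : gs.take r ++ [[]] = gs := by
      have := List.take_succ (l := gs) (i := r)
      rw [hEq, List.take_length, List.getElem?_eq_getElem hr, hv] at this
      exact this.symm
    rw [hdrop]
    simp only [List.filterMap_cons, List.head?_nil, List.map_cons, List.map_nil,
      List.filterMap_nil, List.tail_nil]
    rw [htake, List.nil_append]

theorem pvTC_pop {α : Type} (gs : List (List α)) (r : Nat) (q : α) (rest : List α)
    (hr : r < gs.length) (hv : gs[r] = q :: rest) :
    pvTailCols gs r = q :: pvTailCols (gs.set r rest) ((r + 1) % gs.length) := by
  have hset : gs.set r rest = gs.take r ++ rest :: gs.drop (r + 1) := by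
    rw [List.set_eq_take_append_cons_drop, if_pos hr]
  have hlt : (gs.take r).length = r := by simp [List.length_take]; omega
  have hlen : (gs.set r rest).length = gs.length := by simp
  rcases Nat.lt_or_ge (r + 1) gs.length with hlt2 | hge
  · rw [Nat.mod_eq_of_lt hlt2]
    unfold pvTailCols
    rw [List.drop_eq_getElem_cons hr, hv]
    have hdrop' : (gs.set r rest).drop (r + 1) = gs.drop (r + 1) := by
      rw [hset, List.drop_append, hlt]
      simp
    have htake' : (gs.set r rest).take (r + 1) = gs.take r ++ [rest] := by
      rw [hset, List.take_append, hlt]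
      simp
    rw [hdrop', htake']
    simp [List.filterMap_cons, List.append_assoc]
  · have hEq : r + 1 = gs.length := by omega
    rw [hEq, Nat.mod_self, pvTC_zero]
    unfold pvTailCols
    have hdrop : gs.drop r = [q :: rest] := by
      rw [List.drop_eq_getElem_cons hr, hv, hEq, List.drop_length]
    have hset2 : gs.set r rest = gs.take r ++ [rest] := by
      rw [hset, hEq, List.drop_length]
    rw [hdrop, hset2]
    simp [List.filterMap_cons]

theorem pvDist_le {α : Type} (gs : List (List α)) (idx : Nat) : pvDist gs idx ≤ gs.length := by
  have := List.findIdx_le_length (p := fun l : List α => !l.isEmpty) (xs := gs.rotate idx)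
  simpa [pvDist, List.length_rotate] using this

theorem pvSum_set {α : Type} (gs : List (List α)) (r : Nat) (q : α) (rest : List α)
    (hr : r < gs.length) (hv : gs[r] = q :: rest) :
    pvSum (gs.set r rest) + 1 = pvSum gs := by
  have hset : gs.set r rest = gs.take r ++ rest :: gs.drop (r + 1) := by
    rw [List.set_eq_take_append_cons_drop, if_pos hr]
  have hgs : gs = gs.take r ++ gs[r] :: gs.drop (r + 1) := by
    conv_lhs => rw [← List.take_append_drop r gs, List.drop_eq_getElem_cons hr]
  rw [hset]
  conv_rhs => rw [hgs, hv]
  simp [pvSum, List.sum_append]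
  omega

theorem pvDist_skip {α : Type} (gs : List (List α)) (idx : Nat) (hk : 0 < gs.length)
    (hv : gs[idx % gs.length]'(Nat.mod_lt idx hk) = [])
    (hne : gs.any (fun l => !l.isEmpty) = true) :
    pvDist gs (idx + 1) + 1 = pvDist gs idx := by
  set p : List α → Bool := fun l => !l.isEmpty with hp
  set r := idx % gs.length with hrdef
  have hr : r < gs.length := Nat.mod_lt idx hk
  have hrot : gs.rotate idx = [] :: (gs.drop (r + 1) ++ gs.take r) := by
    rw [← List.rotate_mod, ← hrdef, List.rotate_eq_drop_append_take (le_of_lt hr),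
      List.drop_eq_getElem_cons hr, hv, List.cons_append]
  -- a nonempty group survives outside position r
  have hex : ∃ l ∈ gs.drop (r + 1) ++ gs.take r, p l = true := by
    simp only [List.any_eq_true] at hne
    obtain ⟨l, hl, hpl⟩ := hne
    have : l ∈ gs.rotate idx := (List.mem_rotate).mpr hl
    rw [hrot] at this
    rcases List.mem_cons.mp this with h | h
    · subst h; simp [hp] at hpl
    · exact ⟨l, h, hpl⟩
  have hlt : (gs.drop (r + 1) ++ gs.take r).findIdx p < (gs.drop (r + 1) ++ gs.take r).length :=
    List.findIdx_lt_length.mpr hex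
  have hdist : pvDist gs idx = (gs.drop (r + 1) ++ gs.take r).findIdx p + 1 := by
    rw [pvDist, hrot, List.findIdx_cons]
    simp [hp]
  have hmod2 : (idx + 1) % gs.length = (r + 1) % gs.length := by
    conv_lhs => rw [← Nat.mod_add_mod]
  rcases Nat.lt_or_ge (r + 1) gs.length with hlt2 | hge
  · have hmod : (idx + 1) % gs.length = r + 1 := by
      rw [hmod2, Nat.mod_eq_of_lt hlt2]
    have hrot2 : gs.rotate (idx + 1) = gs.drop (r + 1) ++ gs.take (r + 1) := by
      rw [← List.rotate_mod, hmod, List.rotate_eq_drop_append_take (le_of_lt hlt2)]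
    have htk : gs.take (r + 1) = gs.take r ++ [[]] := by
      rw [List.take_add_one, List.getElem?_eq_getElem hr, hv]
      rfl
    rw [pvDist, hrot2, htk, ← List.append_assoc, List.findIdx_append, if_pos hlt, hdist]
  · have hEq : r + 1 = gs.length := by omega
    have hmod : (idx + 1) % gs.length = 0 := by
      rw [hmod2, hEq, Nat.mod_self]
    have hrot2 : gs.rotate (idx + 1) = gs := by
      rw [← List.rotate_mod, hmod, List.rotate_zero]
    have hgs : gs = gs.take r ++ [[]] := by
      have := List.take_add_one (l := gs) (i := r)
      rw [hEq, List.take_length, List.getElem?_eq_getElem hr, hv] at this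
      simpa using this
    have hdropnil : gs.drop (r + 1) = [] := by rw [hEq, List.drop_length]
    rw [hdropnil, List.nil_append] at hdist hlt hex
    rw [pvDist, hrot2]
    conv_lhs => rw [hgs]
    rw [List.findIdx_append, if_pos hlt, hdist]

theorem pvValuesLen {κ ν : Type} [BEq κ] (d : PySem.Dict κ ν) :
    d.values.length = d.keys.length := by
  simp [PySem.Dict.values, PySem.Dict.keys]

theorem pvKeysLen {κ ν : Type} [BEq κ] (d : PySem.Dict κ ν) :
    d.keys.length = d.items.length := by
  simp [PySem.Dict.keys]

theorem pvKeyVal {κ ν : Type} [BEq κ] [LawfulBEq κ] (d : PySem.Dict κ ν)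
    (hnd : d.keys.Nodup) (i : Nat) (hi : i < d.keys.length) (d0 : ν) :
    d.getD (d.keys[i]) d0 = d.values[i]'(by rw [pvValuesLen]; exact hi) := by
  have hii : i < d.items.length := by rw [← pvKeysLen]; exact hi
  have hk : d.keys[i] = (d.items[i]).1 := by simp [PySem.Dict.keys]
  have hv : d.values[i]'(by rw [pvValuesLen]; exact hi) = (d.items[i]).2 := by
    simp [PySem.Dict.values]
  rw [hk, hv]
  exact PySem.Dict.getD_of_mem_items d (by simpa using List.getElem_mem hii) hnd d0

theorem pvInsertVals {κ ν : Type} [BEq κ] [LawfulBEq κ] (d : PySem.Dict κ ν)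
    (hnd : d.keys.Nodup) (i : Nat) (hi : i < d.keys.length) (v : ν) :
    (d.insert (d.keys[i]) v).values = d.values.set i v := by
  have hii : i < d.items.length := by rw [← pvKeysLen]; exact hi
  have hc : d.contains (d.keys[i]) = true := by
    rw [PySem.Dict.contains_iff_mem_keys]
    exact List.getElem_mem hi
  have hitems := PySem.Dict.items_insert_of_contains d v hc
  apply List.ext_getElem
  · simp [PySem.Dict.values, hitems, pvKeysLen]
  · intro j hj hj2
    have hjit : j < d.items.length := by
      simpa [PySem.Dict.values, hitems] using hj
    have hkj : d.keys[j]'(by rwa [pvKeysLen]) = (d.items[j]).1 := by simp [PySem.Dict.keys]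
    have hki : d.keys[i] = (d.items[i]).1 := by simp [PySem.Dict.keys]
    simp only [PySem.Dict.values, hitems, List.getElem_map, List.getElem_set]
    by_cases hij : j = i
    · subst hij
      rw [← hki, if_pos (by simp), if_pos rfl]
    · have hkeq : d.keys[j]'(by rwa [pvKeysLen]) ≠ d.keys[i] := by
        intro hEq
        exact hij ((List.Nodup.getElem_inj_iff hnd).mp hEq)
      have hne : (d.items[j]).1 ≠ d.keys[i] := by rw [← hkj]; exact hkeq
      rw [if_neg (by simpa using hne), if_neg (fun h => hij h.symm)]

theorem pvTailCols_nil {α : Type} (gs : List (List α)) (r : Nat) (h : ∀ l ∈ gs, l = []) :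
    pvTailCols gs r = [] := by
  rw [pvTailCols, List.filterMap_eq_nil_iff.mpr, pvColumns_eq_nil, List.nil_append]
  · intro l hl
    rcases List.mem_append.mp hl with h2 | h2
    · exact h l (List.mem_of_mem_take h2)
    · obtain ⟨g, hg, rfl⟩ := List.mem_map.mp h2
      rw [h g (List.mem_of_mem_drop hg)]
      rfl
  · intro l hl
    rw [h l (List.mem_of_mem_drop hl)]
    rfl

theorem pvLoopA_eq (fuel : Nat) :
    ∀ (d : PySem.Dict String (List (List (String × String))))
      (sel : List (List (String × String))) (idx : Nat) (n : Int),
    d.keys.Nodup →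
    pvSum d.values * (d.keys.length + 1) + pvDist d.values idx + 1 ≤ fuel →
    pvLoopA fuel d d.keys sel idx n
      = sel ++ (pvTailCols d.values (idx % d.values.length)).take (n - sel.length).toNat := by
  induction fuel with
  | zero => intro d sel idx n hnd hf; omega
  | succ fuel ih =>
    intro d sel idx n hnd hf
    rw [pvLoopA]
    by_cases hg : (sel.length : Int) < n ∧ d.values.any (fun l => !l.isEmpty) = true
    · rw [if_pos hg]
      obtain ⟨hsel, hany⟩ := hg
      have hk0 : 0 < d.values.length := by
        rcases List.any_eq_true.mp hany with ⟨l, hl, _⟩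
        exact List.length_pos_of_mem hl
      have hkk : d.keys.length = d.values.length := (pvValuesLen d).symm
      have hr : idx % d.values.length < d.values.length := Nat.mod_lt idx hk0
      have hrk : idx % d.keys.length < d.keys.length := by rw [hkk]; exact hr
      have hidx : idx % d.keys.length = idx % d.values.length := by rw [hkk]
      have hrole : d.keys.getD (idx % d.keys.length) ""
          = d.keys[idx % d.values.length]'(by rw [hkk]; exact hr) := by
        rw [List.getD_eq_getElem _ _ hrk]
        congr 1
      have hget := pvKeyVal d hnd (idx % d.values.length) (by rw [hkk]; exact hr) []
      have hmod2 : (idx + 1) % d.values.length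
          = (idx % d.values.length + 1) % d.values.length := by
        conv_lhs => rw [← Nat.mod_add_mod]
      cases hv : d.values[idx % d.values.length]'hr with
      | nil =>
        rw [hrole, hget, hv]
        rw [ih d sel (idx + 1) n hnd (by
          have hds := pvDist_skip d.values idx hk0 hv hany
          omega)]
        rw [hmod2, pvTC_skip d.values (idx % d.values.length) hr hv hany]
      | cons q rest =>
        have hc : d.contains (d.keys[idx % d.values.length]'(by rw [hkk]; exact hr)) = true := by
          rw [PySem.Dict.contains_iff_mem_keys]
          exact List.getElem_mem _
        have hkeys' := PySem.Dict.keys_insert_of_contains d rest hc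
        have hvals' := pvInsertVals d hnd (idx % d.values.length) (by rw [hkk]; exact hr) rest
        rw [hrole, hget, hv]
        have hnd' : (d.insert (d.keys[idx % d.values.length]'(by rw [hkk]; exact hr)) rest).keys.Nodup := by
          rw [hkeys']; exact hnd
        have hsum := pvSum_set d.values (idx % d.values.length) q rest hr hv
        have hdl := pvDist_le (d.values.set (idx % d.values.length) rest) (idx + 1)
        have hbound : pvSum (d.insert (d.keys[idx % d.values.length]'(by rw [hkk]; exact hr)) rest).values
            * ((d.insert (d.keys[idx % d.values.length]'(by rw [hkk]; exact hr)) rest).keys.length + 1)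
            + pvDist (d.insert (d.keys[idx % d.values.length]'(by rw [hkk]; exact hr)) rest).values (idx + 1) + 1 ≤ fuel := by
          rw [hkeys', hvals']
          have hls : (d.values.set (idx % d.values.length) rest).length = d.values.length := by simp
          rw [hkk] at hf ⊢
          have hpd := pvDist_le d.values idx
          rw [hls] at hdl
          rw [← hkk] at hdl hpd
          have hmul : pvSum (d.values.set (idx % d.values.length) rest) * (d.keys.length + 1)
              + (d.keys.length + 1) = pvSum d.values * (d.keys.length + 1) := by
            rw [← hsum]; ring
          rw [hkk] at hmul hdl hpd
          omega
        change pvLoopA fuel (d.insert (d.keys[idx % d.values.length]'(by rw [hkk]; exact hr)) rest)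
            d.keys (sel ++ [q]) (idx + 1) n
          = sel ++ List.take (n - (sel.length : Int)).toNat (pvTailCols d.values (idx % d.values.length))
        have := ih (d.insert (d.keys[idx % d.values.length]'(by rw [hkk]; exact hr)) rest)
          (sel ++ [q]) (idx + 1) n hnd' hbound
        rw [hkeys'] at this
        rw [this, hvals']
        have hls : (d.values.set (idx % d.values.length) rest).length = d.values.length := by simp
        rw [hls, hmod2]
        rw [pvTC_pop d.values (idx % d.values.length) q rest hr hv]
        have hm : (n - (sel.length : Int)).toNat
            = (n - ((sel ++ [q]).length : Int)).toNat + 1 := by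
          simp only [List.length_append, List.length_cons, List.length_nil]
          omega
        rw [hm, List.take_succ_cons]
        simp
    · rw [if_neg hg]
      by_cases hsel : (sel.length : Int) < n
      · have hany : d.values.any (fun l => !l.isEmpty) = false := by
          rcases Bool.eq_false_or_eq_true (d.values.any (fun l => !l.isEmpty)) with h | h
          · exact absurd ⟨hsel, h⟩ hg
          · exact h
        have hall : ∀ l ∈ d.values, l = [] := by
          intro l hl
          have := List.any_eq_false.mp hany l hl
          simpa using this
        rw [pvTailCols_nil _ _ hall]
        simp
      · have : (n - (sel.length : Int)).toNat = 0 := by omega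
        rw [this, List.take_zero, List.append_nil]

theorem pv_main (evals : List (List (String × String))) (n : Int) :
    select_eval_subset evals n = select_eval_subset_alt evals n := by
  rw [select_eval_subset, select_eval_subset_alt]
  have h0 : (PySem.Dict.empty : PySem.Dict String (List (List (String × String)))).keys.Nodup :=
    PySem.Dict.nodup_keys_empty
  have hnd : ((evals.filter (fun q => (PySem.Dict.mk q).get? "type" == some "answerable")).foldl
      (fun d q => d.modify ((PySem.Dict.mk q).getD "role" "unknown") [] (fun l => l ++ [q]))
      PySem.Dict.empty).keys.Nodup :=
    PySem.Dict.nodup_keys_foldl_modify_key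
      (evals.filter (fun q => (PySem.Dict.mk q).get? "type" == some "answerable"))
      (fun q => (PySem.Dict.mk q).getD "role" "unknown") []
      (fun _ q => fun l => l ++ [q]) PySem.Dict.empty h0
  rw [List.foldl_filter]
  rw [List.foldl_filter] at hnd
  set byRole := evals.foldl
      (fun d q => if (PySem.Dict.mk q).get? "type" == some "answerable" then
          d.modify ((PySem.Dict.mk q).getD "role" "unknown") [] (fun l => l ++ [q])
        else d)
      PySem.Dict.empty with hbr
  have hfuel : pvSum byRole.values * (byRole.keys.length + 1) + pvDist byRole.values 0 + 1
      ≤ (byRole.values.map List.length).sum * (byRole.keys.length + 1) + byRole.keys.length + 1 := by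
    have h1 := pvDist_le byRole.values 0
    have h2 := pvValuesLen byRole
    simp only [pvSum]
    omega
  rw [pvLoopA_eq _ byRole [] 0 n hnd hfuel]
  rw [Nat.zero_mod, pvTC_zero]
  simp only [List.length_nil, Nat.cast_zero, Int.sub_zero, List.nil_append]
  by_cases hn : n ≤ 0
  · rw [if_pos hn]
    have hz : n.toNat = 0 := by omega
    rw [hz, List.take_zero]
    rcases eq_or_lt_of_le hn with hEq | hlt
    · rw [hEq]
      rw [PySem.List.slice_to _ (le_refl 0)]
      simp
    · have hk : 0 < (-n).toNat := by omega
      have : n = -(((-n).toNat : Nat) : Int) := by omega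
      rw [this, PySem.List.slice_to_neg_natCast _ _ hk]
      simp
  · rw [if_neg hn]
    show PySem.List.slice (List.take n.toNat (pvColumns byRole.values)) none (some n)
        = PySem.List.slice (pvColumns byRole.values) none (some n)
    rw [PySem.List.slice_to _ (by omega), PySem.List.slice_to _ (by omega),
      List.take_take, min_self]

-- ===== VERDICT (by name: the statement is the Claim_ definition above) =====
theorem select_eval_subset_spec : Claim_equal_select_eval_subset := by
  intro evals n _
  unfold Spec_select_eval_subset
  exact pv_main evals n
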